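-- pv_equiv track=rewrite | github.com/conradstorz/Morse-Code | Morse_Code.py | equivalent_number_of_space_characters
-- ===== SOURCE A (Python) =====
-- WORD_SPACING = 7
--
-- def equivalent_number_of_space_characters(string):
--     """ Given string of spaces return one space character
--         for each seven spaces.
--         """
--     output = ''
--     chars = ''
--     slist = list(string)
--     while len(slist) > 0:
--         output += slist.pop(0)
--         if len(output) == WORD_SPACING:
--             chars += ' '
--             output = ''
--     return chars
-- ===== SOURCE B (Python) =====
-- WORD_SPACING = 7
--
-- def equivalent_number_of_space_characters(string):
--     """ Given string of spaces return one space character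
--         for each seven spaces.
--         """
--     return ' ' * (len(string) // WORD_SPACING)
-- ===== Notes on version B (the rewrite author's own statement) =====
-- stated objective: faster
-- what changed: Replaced the quadratic pop(0)/accumulator loop with a closed form: a space repeated len(string) floor-divided by 7 times.
import Mathlib
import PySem

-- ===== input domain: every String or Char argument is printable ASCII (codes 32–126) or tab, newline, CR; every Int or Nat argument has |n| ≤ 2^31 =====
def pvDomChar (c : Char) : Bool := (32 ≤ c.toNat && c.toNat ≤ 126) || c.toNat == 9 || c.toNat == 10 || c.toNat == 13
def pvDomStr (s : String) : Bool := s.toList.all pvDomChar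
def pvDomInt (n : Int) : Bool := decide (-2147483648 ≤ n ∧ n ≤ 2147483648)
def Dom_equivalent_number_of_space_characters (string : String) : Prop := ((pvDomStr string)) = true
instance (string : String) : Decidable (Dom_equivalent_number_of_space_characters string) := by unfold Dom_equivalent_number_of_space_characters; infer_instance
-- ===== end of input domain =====

-- B replaces A's quadratic pop(0)/buffer loop with a closed form built from len(string)//7 (faster).
-- ===== PORT A =====
-- while loop of A: pop chars from the front, emit ' ' each time the buffer reaches 7
def pvALoop : List Char → List Char → String → String
  | [], _, chars => chars
  | c :: rest, output, chars =>
      let output' := output ++ [c]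
      if output'.length = 7 then pvALoop rest [] (chars ++ " ")
      else pvALoop rest output' chars

def equivalent_number_of_space_characters (string : String) : String :=
  pvALoop string.toList [] ""

-- ===== PORT B =====
-- B: closed form ' ' * (len(string) // 7)
def equivalent_number_of_space_characters_alt (string : String) : String :=
  String.ofList (List.replicate (string.toList.length / 7) ' ')

-- ===== PRECONDITION & SPEC =====
def Spec_equivalent_number_of_space_characters (string : String) (out : String) : Prop := out = equivalent_number_of_space_characters_alt string
instance (string : String) (out : String) : Decidable (Spec_equivalent_number_of_space_characters string out) := by unfold Spec_equivalent_number_of_space_characters; infer_instance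

-- ===== CLAIM (what is proved, stated in full; the proofs are below) =====
def Claim_equal_equivalent_number_of_space_characters : Prop := ∀ (string : String), Dom_equivalent_number_of_space_characters string → Spec_equivalent_number_of_space_characters string (equivalent_number_of_space_characters string)

-- ===== LEMMAS AND PROOFS =====

-- ===== VERDICT (by name: the statement is the Claim_ definition above) =====
lemma pvALoop_closed (l : List Char) : ∀ (out : List Char) (chars : String),
    out.length < 7 →
    pvALoop l out chars = chars ++ String.ofList (List.replicate ((out.length + l.length) / 7) ' ') := by
  induction l with
  | nil =>
      intro out chars h
      have : out.length / 7 = 0 := Nat.div_eq_of_lt h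
      simp only [pvALoop, this, List.length_nil, Nat.add_zero, List.replicate_zero]
      apply String.ext
      simp
  | cons c rest ih =>
      intro out chars h
      by_cases h7 : out.length + 1 = 7
      · have h7' : (out ++ [c]).length = 7 := by simp [h7]
        rw [pvALoop]
        rw [if_pos h7']
        rw [ih [] (chars ++ " ") (by simp)]
        have hdiv : (out.length + (c :: rest).length) / 7 = rest.length / 7 + 1 := by
          simp
          omega
        rw [hdiv]
        apply String.ext
        simp [List.replicate_succ]
      · have hlt : (out ++ [c]).length < 7 := by simp; omega
        have hne : ¬ (out ++ [c]).length = 7 := by omega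
        rw [pvALoop]
        simp only [hne, ite_false]
        rw [ih (out ++ [c]) chars hlt]
        congr 3
        simp
        omega

theorem equivalent_number_of_space_characters_spec : Claim_equal_equivalent_number_of_space_characters := by
  intro s _
  unfold Spec_equivalent_number_of_space_characters equivalent_number_of_space_characters equivalent_number_of_space_characters_alt
  rw [pvALoop_closed _ [] "" (by simp)]
  apply String.ext
  simp
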